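-- pv_equiv track=rewrite | github.com/locharp/code-snippets | Coding Ninjas/Ninja/Similar Strings.py | similarStrings
-- ===== SOURCE A (Python) =====
-- def similarStrings( n, a, b, c ):
--     ans = [ 0, 2147483647 ]
--
--     x = [ ord( i ) for i in a ]
--     y = [ ord( i ) for i in b ]
--     z = [ ord( i ) for i in c ]
--
--     for i in range( n ):
--         curr = 0
--
--         for j in range( n ):
--             k = ( i + j ) % n
--             curr += abs( x[k] - y[j] ) + abs( x[k] - z[j] )
--
--         ans[0] = max( ans[0], curr )
--         ans[1] = min( ans[1], curr )
--
--     return ans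
-- ===== SOURCE B (Python) =====
-- def similarStrings(n, a, b, c):
--     # Group positions of a by character: each distinct character's cost row against
--     # (b, c) is computed once, and per occurrence a reversed slice of the doubled row
--     # (its cyclic shift) is vector-added into the per-rotation totals.
--     y = [ord(ch) for ch in b]
--     z = [ord(ch) for ch in c]
--     head = [a[p] for p in range(n)]
--     rots = [0] * n
--     for ch in dict.fromkeys(head):
--         v = ord(ch)
--         row2 = [abs(v - y[j]) + abs(v - z[j]) for j in range(n)] * 2
--         for p in range(n):
--             if head[p] == ch:
--                 seg = row2[p + 1 : p + n + 1][::-1]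
--                 rots = [r + s for r, s in zip(rots, seg)]
--     ans = [0, 2147483647]
--     for t in rots:
--         ans[0] = max(ans[0], t)
--         ans[1] = min(ans[1], t)
--     return ans
-- ===== Notes on version B (the rewrite author's own statement) =====
-- stated objective: alternative
-- what changed: B groups the positions of a by distinct character (dict.fromkeys), computes each character's cost row against (b,c) once, and vector-adds a reversed slice of the doubled row (the cyclic shift for each occurrence) into a per-rotation totals list, then takes max/min in one pass; A instead recomputes every rotation's sum from scratch with modular indexing and folds max/min per rotation.
import Mathlib
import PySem

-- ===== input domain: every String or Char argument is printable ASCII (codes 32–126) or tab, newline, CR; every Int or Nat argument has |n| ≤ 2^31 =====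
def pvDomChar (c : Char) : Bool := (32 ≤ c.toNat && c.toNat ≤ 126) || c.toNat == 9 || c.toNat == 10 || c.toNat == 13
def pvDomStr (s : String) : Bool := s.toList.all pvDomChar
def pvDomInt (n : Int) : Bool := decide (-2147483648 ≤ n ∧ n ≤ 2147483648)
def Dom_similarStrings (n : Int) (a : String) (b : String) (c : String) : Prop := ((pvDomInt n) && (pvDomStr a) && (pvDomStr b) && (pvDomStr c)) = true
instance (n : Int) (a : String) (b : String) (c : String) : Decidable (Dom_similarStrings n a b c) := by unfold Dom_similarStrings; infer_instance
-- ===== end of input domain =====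

-- B groups a's positions by distinct character, builds each character's cost row once,
-- and vector-adds reversed slices of the doubled row (cyclic shifts) into per-rotation
-- totals; A recomputes every rotation's sum with modular indexing (alternative).

-- ===== PORT A =====
def similarStrings (n : Int) (a : String) (b : String) (c : String) : List Int :=
  let x := a.toList.map (fun i => (i.toNat : Int))
  let y := b.toList.map (fun i => (i.toNat : Int))
  let z := c.toList.map (fun i => (i.toNat : Int))
  let ans := (PySem.List.pyRange 0 n 1).foldl (fun (ans : Int × Int) i =>
      let curr := (PySem.List.pyRange 0 n 1).foldl (fun (curr : Int) j =>
          let k := PySem.Int.mod (i + j) n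
          curr + (|PySem.List.pyGetD x k 0 - PySem.List.pyGetD y j 0| +
                  |PySem.List.pyGetD x k 0 - PySem.List.pyGetD z j 0|)) 0
      (max ans.1 curr, min ans.2 curr)) ((0 : Int), (2147483647 : Int))
  [ans.1, ans.2]

-- ===== PORT B =====
def similarStrings_alt (n : Int) (a : String) (b : String) (c : String) : List Int :=
  let y := b.toList.map (fun ch => (ch.toNat : Int))
  let z := c.toList.map (fun ch => (ch.toNat : Int))
  let head := (PySem.List.pyRange 0 n 1).map (fun p => PySem.List.pyGetD a.toList p ' ')
  let rots := List.replicate n.toNat (0 : Int)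
  let rots := (PySem.List.dedup head).foldl (fun rots ch =>
      let v := (ch.toNat : Int)
      let row2 := (PySem.List.pyRange 0 n 1).map (fun j =>
          |v - PySem.List.pyGetD y j 0| + |v - PySem.List.pyGetD z j 0|)
      let row2 := row2 ++ row2
      (PySem.List.pyRange 0 n 1).foldl (fun rots p =>
        if PySem.List.pyGetD head p ' ' == ch then
          let seg := (PySem.List.slice row2 (some (p + 1)) (some (p + n + 1))).reverse
          List.zipWith (· + ·) rots seg
        else rots) rots) rots
  let ans := rots.foldl (fun (ans : Int × Int) t => (max ans.1 t, min ans.2 t))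
      ((0 : Int), (2147483647 : Int))
  [ans.1, ans.2]

-- ===== PRECONDITION & SPEC =====
-- Pre_ excludes exactly the inputs where A raises IndexError: n exceeding a string length.
def Pre_similarStrings (n : Int) (a : String) (b : String) (c : String) : Prop :=
  n ≤ (a.toList.length : Int) ∧ n ≤ (b.toList.length : Int) ∧ n ≤ (c.toList.length : Int)
instance (n : Int) (a : String) (b : String) (c : String) : Decidable (Pre_similarStrings n a b c) := by
  unfold Pre_similarStrings; infer_instance
def pvWitness_similarStrings : Int × String × String × String := (3, "abc", "bda", "cab")

def Spec_similarStrings (n : Int) (a : String) (b : String) (c : String) (out : List Int) : Prop := out = similarStrings_alt n a b c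
instance (n : Int) (a : String) (b : String) (c : String) (out : List Int) : Decidable (Spec_similarStrings n a b c out) := by unfold Spec_similarStrings; infer_instance

-- ===== CLAIM (what is proved, stated in full; the proofs are below) =====
def Claim_equal_similarStrings : Prop := ∀ (n : Int) (a : String) (b : String) (c : String), Dom_similarStrings n a b c → Pre_similarStrings n a b c → Spec_similarStrings n a b c (similarStrings n a b c)

-- ===== LEMMAS AND PROOFS =====

def pvW (x y z : List Int) (p q : ℕ) : Int :=
  |x.getD p 0 - y.getD q 0| + |x.getD p 0 - z.getD q 0|

def pvCurr (x y z : List Int) (N s : ℕ) : Int :=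
  ∑ j ∈ Finset.range N, pvW x y z ((s + j) % N) j

theorem pv_lsum (N : ℕ) (f : ℕ → Int) :
    ((List.range N).map f).sum = ∑ j ∈ Finset.range N, f j := rfl

theorem pv_innerA (x y z : List Int) (N i : ℕ) :
    (List.range N).foldl (fun (curr : Int) (j : ℕ) =>
        curr + (|PySem.List.pyGetD x (PySem.Int.mod ((i : ℤ) + (j : ℤ)) (N : ℤ)) 0 -
                  PySem.List.pyGetD y (j : ℤ) 0| +
                |PySem.List.pyGetD x (PySem.Int.mod ((i : ℤ) + (j : ℤ)) (N : ℤ)) 0 -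
                  PySem.List.pyGetD z (j : ℤ) 0|)) 0 = pvCurr x y z N i := by
  rw [PySem.List.foldl_add, zero_add, pv_lsum]
  unfold pvCurr
  refine Finset.sum_congr rfl ?_
  intro j _
  simp only [← Nat.cast_add, PySem.Int.mod_natCast, PySem.List.pyGetD_natCast, pvW]

-- a % N for a < 2N
theorem pv_mod_small (N a : ℕ) (h : a < 2 * N) : a % N = if a < N then a else a - N := by
  split_ifs with h'
  · exact Nat.mod_eq_of_lt h'
  · rw [Nat.mod_eq_sub_mod (by omega)]
    exact Nat.mod_eq_of_lt (by omega)

-- the two cyclic-shift index identities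
theorem pv_id1 (N p i : ℕ) (hp : p < N) (hi : i < N) : (i + (p + N - i) % N) % N = p := by
  rw [pv_mod_small N (p + N - i) (by omega)]
  split_ifs with h
  · rw [pv_mod_small N _ (by omega)]
    split_ifs with h2 <;> omega
  · rw [pv_mod_small N _ (by omega)]
    split_ifs with h2 <;> omega

theorem pv_id2 (N j i : ℕ) (hj : j < N) (hi : i < N) : ((i + j) % N + N - i) % N = j := by
  rw [pv_mod_small N (i + j) (by omega)]
  split_ifs with h
  · rw [pv_mod_small N _ (by omega)]
    split_ifs with h2 <;> omega
  · rw [pv_mod_small N _ (by omega)]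
    split_ifs with h2 <;> omega

-- the rotation-sum bijection: summing each position's shifted column equals A's rotation sum
theorem pv_rot (x y z : List Int) (N i : ℕ) (hi : i < N) :
    ∑ p ∈ Finset.range N, pvW x y z p ((p + N - i) % N) = pvCurr x y z N i := by
  unfold pvCurr
  refine Finset.sum_nbij' (fun p => (p + N - i) % N) (fun j => (i + j) % N) ?_ ?_ ?_ ?_ ?_
  · intro p hp
    exact Finset.mem_range.mpr (Nat.mod_lt _ (by have := Finset.mem_range.mp hp; omega))
  · intro j hj
    exact Finset.mem_range.mpr (Nat.mod_lt _ (by have := Finset.mem_range.mp hj; omega))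
  · intro p hp
    exact pv_id1 N p i (Finset.mem_range.mp hp) hi
  · intro j hj
    exact pv_id2 N j i (Finset.mem_range.mp hj) hi
  · intro p hp
    rw [pv_id1 N p i (Finset.mem_range.mp hp) hi]

-- reversed slice of the doubled row reads the cyclically shifted row
theorem pv_getD_reverse (l : List Int) (k : ℕ) (hk : k < l.length) :
    l.reverse.getD k 0 = l.getD (l.length - 1 - k) 0 := by
  rw [List.getD_eq_getElem _ _ (by simpa using hk), List.getD_eq_getElem _ _ (by omega)]
  exact List.getElem_reverse _

theorem pv_getD_take_drop (l : List Int) (m N k : ℕ) (hk : k < N) (hb : m + N ≤ l.length) :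
    ((l.drop m).take N).getD k 0 = l.getD (m + k) 0 := by
  rw [List.getD_eq_getElem _ _ (by simp [List.length_take, List.length_drop]; omega),
    List.getD_eq_getElem _ _ (by omega)]
  rw [List.getElem_take, List.getElem_drop]

theorem pv_app_getD (r : List Int) (N t : ℕ) (hr : r.length = N) (ht : t < 2 * N) :
    (r ++ r).getD t 0 = r.getD (t % N) 0 := by
  have hN : 0 < N := by omega
  rw [pv_mod_small N t ht]
  by_cases h : t < N
  · rw [if_pos h, List.getD_eq_getElem _ _ (by simp; omega), List.getD_eq_getElem _ _ (by omega)]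
    exact List.getElem_append_left (by omega)
  · rw [if_neg h, List.getD_eq_getElem _ _ (by simp; omega), List.getD_eq_getElem _ _ (by omega)]
    rw [List.getElem_append_right (by omega)]
    simp [hr]

theorem pv_seg (r : List Int) (N p i : ℕ) (hr : r.length = N) (hp : p < N) (hi : i < N) :
    ((((r ++ r).drop (p + 1)).take N).reverse).getD i 0 = r.getD ((p + N - i) % N) 0 := by
  have hlt : (((r ++ r).drop (p + 1)).take N).length = N := by
    simp [List.length_take, List.length_drop, hr]; omega
  rw [pv_getD_reverse _ i (by omega), hlt,
    pv_getD_take_drop (r ++ r) (p + 1) N (N - 1 - i) (by omega) (by simp [hr]; omega)]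
  have he : p + 1 + (N - 1 - i) = p + N - i := by omega
  rw [he, pv_app_getD r N _ hr (by omega)]

-- generic additive-fold lemma: a fold whose step adds c t i at every slot i
theorem pv_fold_add {α : Type} (N : ℕ) :
    ∀ (l : List α) (step : List Int → α → List Int) (cf : α → ℕ → Int),
      (∀ rots t, t ∈ l → rots.length = N → (step rots t).length = N ∧
          ∀ i, i < N → (step rots t).getD i 0 = rots.getD i 0 + cf t i) →
      ∀ rots : List Int, rots.length = N →
        (l.foldl step rots).length = N ∧
        ∀ i, i < N → (l.foldl step rots).getD i 0 = rots.getD i 0 + (l.map (fun t => cf t i)).sum := by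
  intro l
  induction l with
  | nil => intro step cf _ rots hlen; exact ⟨hlen, by simp⟩
  | cons t l ih =>
      intro step cf h rots hlen
      have ht := h rots t (List.mem_cons_self ..) hlen
      have hrec := ih step cf (fun r u hu hr => h r u (List.mem_cons_of_mem _ hu) hr) (step rots t) ht.1
      refine ⟨hrec.1, ?_⟩
      intro i hi
      rw [List.foldl_cons, hrec.2 i hi, ht.2 i hi]
      simp only [List.map_cons, List.sum_cons]
      ring

-- swap a list-sum of Finset-sums
theorem pv_swap {α : Type} (L : List α) (N : ℕ) (f : α → ℕ → Int) :
    (L.map (fun t => ∑ p ∈ Finset.range N, f t p)).sum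
      = ∑ p ∈ Finset.range N, (L.map (fun t => f t p)).sum := by
  induction L with
  | nil => simp
  | cons t L ih => simp [ih, Finset.sum_add_distrib]

-- summing an indicator over a nodup list containing the key
theorem pv_sum_single {α : Type} [DecidableEq α] (L : List α) (x : α) (v : Int) :
    L.Nodup → x ∈ L → (L.map (fun t => if x = t then v else 0)).sum = v := by
  induction L with
  | nil => intro _ hx; cases hx
  | cons t L ih =>
      intro hnd hx
      simp only [List.map_cons, List.sum_cons]
      rcases List.mem_cons.mp hx with h | h
      · subst h
        rw [if_pos rfl]
        have : (L.map (fun t => if x = t then v else 0)).sum = 0 := by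
          apply List.sum_eq_zero
          intro u hu
          rcases List.mem_map.mp hu with ⟨w, hw, hwu⟩
          rw [← hwu, if_neg (by rintro rfl; exact (List.nodup_cons.mp hnd).1 hw)]
        rw [this, add_zero]
      · rw [if_neg (by rintro rfl; exact (List.nodup_cons.mp hnd).1 h), zero_add]
        exact ih (List.nodup_cons.mp hnd).2 h

-- proof-only helpers naming B's intermediate values (definitionally equal to the port's lets)
def pvH (a : String) (n : Int) : List Char :=
  (PySem.List.pyRange 0 n 1).map (fun p => PySem.List.pyGetD a.toList p ' ')

def pvRow (y z : List Int) (n : Int) (ch : Char) : List Int :=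
  (PySem.List.pyRange 0 n 1).map (fun j =>
    |(ch.toNat : Int) - PySem.List.pyGetD y j 0| + |(ch.toNat : Int) - PySem.List.pyGetD z j 0|)

def pvRots (a : String) (y z : List Int) (n : Int) : List Int :=
  (PySem.List.dedup (pvH a n)).foldl (fun rots ch =>
    (PySem.List.pyRange 0 n 1).foldl (fun rots p =>
      if PySem.List.pyGetD (pvH a n) p ' ' == ch then
        List.zipWith (· + ·) rots
          ((PySem.List.slice (pvRow y z n ch ++ pvRow y z n ch) (some (p + 1)) (some (p + n + 1))).reverse)
      else rots) rots) (List.replicate n.toNat (0 : Int))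

def pvAns (g : ℕ → Int) (N : ℕ) : Int × Int :=
  (List.range N).foldl (fun ans i => (max ans.1 (g i), min ans.2 (g i))) ((0 : Int), (2147483647 : Int))

theorem pv_A_eq (a bs cs : String) (N : ℕ) :
    similarStrings (N : ℤ) a bs cs =
      [(pvAns (pvCurr (a.toList.map (fun i => (i.toNat : Int))) (bs.toList.map (fun i => (i.toNat : Int)))
          (cs.toList.map (fun i => (i.toNat : Int))) N) N).1,
       (pvAns (pvCurr (a.toList.map (fun i => (i.toNat : Int))) (bs.toList.map (fun i => (i.toNat : Int)))
          (cs.toList.map (fun i => (i.toNat : Int))) N) N).2] := by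
  simp only [similarStrings, PySem.List.pyRange_zero_natCast, List.foldl_map]
  simp only [pv_innerA]
  rfl

theorem pv_rots_eq (a bs cs : String) (N : ℕ) (hN : 0 < N)
    (ha : N ≤ a.toList.length) (_hb : N ≤ bs.toList.length) (_hc : N ≤ cs.toList.length) :
    pvRots a (bs.toList.map (fun i => (i.toNat : Int))) (cs.toList.map (fun i => (i.toNat : Int))) (N : ℤ)
      = (List.range N).map (pvCurr (a.toList.map (fun i => (i.toNat : Int)))
          (bs.toList.map (fun i => (i.toNat : Int))) (cs.toList.map (fun i => (i.toNat : Int))) N) := by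
  set x := a.toList.map (fun i => (i.toNat : Int)) with hxdef
  set y := bs.toList.map (fun i => (i.toNat : Int)) with hydef
  set z := cs.toList.map (fun i => (i.toNat : Int)) with hzdef
  set hd : ℕ → Char := fun p => a.toList.getD p ' ' with hhd
  have hH : pvH a (N : ℤ) = (List.range N).map hd := by
    simp only [pvH, PySem.List.pyRange_zero_natCast, List.map_map]
    refine List.map_congr_left ?_
    intro p _
    simp [PySem.List.pyGetD_natCast, hhd]
  have hrowlen : ∀ ch, (pvRow y z (N : ℤ) ch).length = N := by
    intro ch
    simp [pvRow, PySem.List.pyRange_zero_natCast]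
  have hrowget : ∀ (ch : Char) (q : ℕ), q < N →
      (pvRow y z (N : ℤ) ch).getD q 0
        = |(ch.toNat : Int) - y.getD q 0| + |(ch.toNat : Int) - z.getD q 0| := by
    intro ch q hq
    simp only [pvRow, PySem.List.pyRange_zero_natCast, List.map_map]
    rw [List.getD_eq_getElem _ _ (by simpa using hq)]
    simp [PySem.List.pyGetD_natCast]
  have hx : ∀ p : ℕ, p < N → x.getD p 0 = (((hd p).toNat : Int)) := by
    intro p hp
    rw [hxdef, List.getD_eq_getElem _ _ (by simpa using lt_of_lt_of_le hp ha), List.getElem_map]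
    rw [hhd]
    simp only []
    rw [List.getD_eq_getElem _ _ (lt_of_lt_of_le hp ha)]
  have hcond : ∀ p : ℕ, p < N →
      PySem.List.pyGetD ((List.range N).map hd) (p : ℤ) ' ' = hd p := by
    intro p hp
    rw [PySem.List.pyGetD_natCast, List.getD_eq_getElem _ _ (by simpa using hp)]
    simp
  -- the contribution of position p at rotation slot i
  have hinner : ∀ (ch : Char) (rots : List Int), rots.length = N →
      ((List.range N).foldl (fun rots (p : ℕ) =>
          if PySem.List.pyGetD ((List.range N).map hd) (p : ℤ) ' ' == ch then
            List.zipWith (· + ·) rots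
              ((PySem.List.slice (pvRow y z (N : ℤ) ch ++ pvRow y z (N : ℤ) ch)
                  (some ((p : ℤ) + 1)) (some ((p : ℤ) + (N : ℤ) + 1))).reverse)
          else rots) rots).length = N ∧
      ∀ i, i < N →
        ((List.range N).foldl (fun rots (p : ℕ) =>
          if PySem.List.pyGetD ((List.range N).map hd) (p : ℤ) ' ' == ch then
            List.zipWith (· + ·) rots
              ((PySem.List.slice (pvRow y z (N : ℤ) ch ++ pvRow y z (N : ℤ) ch)
                  (some ((p : ℤ) + 1)) (some ((p : ℤ) + (N : ℤ) + 1))).reverse)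
          else rots) rots).getD i 0
          = rots.getD i 0 + ((List.range N).map (fun p =>
              if hd p = ch then pvW x y z p ((p + N - i) % N) else 0)).sum := by
    intro ch rots hlen
    refine pv_fold_add N (List.range N) _
      (fun p i => if hd p = ch then pvW x y z p ((p + N - i) % N) else 0) ?_ rots hlen
    intro rots p hp hlen
    have hpN : p < N := List.mem_range.mp hp
    rw [hcond p hpN]
    have hb1 : ((p : ℤ) + 1) = (((p + 1 : ℕ) : ℤ)) := by push_cast; ring
    have hb2 : ((p : ℤ) + (N : ℤ) + 1) = (((p + 1 : ℕ) : ℤ) + (N : ℤ)) := by push_cast; ring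
    rw [hb1, hb2, PySem.List.slice_natCast_add]
    have hseglen : ((((pvRow y z (N : ℤ) ch ++ pvRow y z (N : ℤ) ch).drop (p + 1)).take N).reverse).length = N := by
      simp [List.length_take, List.length_drop, hrowlen]
      omega
    by_cases hch : hd p = ch
    · rw [if_pos (by simp [hch])]
      constructor
      · simp [List.length_zipWith, hlen, hseglen]
      · intro i hi
        have hzl : (List.zipWith (· + ·) rots
            ((((pvRow y z (N : ℤ) ch ++ pvRow y z (N : ℤ) ch).drop (p + 1)).take N).reverse)).length = N := by
          simp [List.length_zipWith, hlen, hseglen]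
        rw [List.getD_eq_getElem _ _ (by omega), List.getElem_zipWith]
        rw [← List.getD_eq_getElem rots 0 (by omega), ← List.getD_eq_getElem _ 0 (by omega)]
        rw [pv_seg _ N p i (hrowlen ch) hpN hi]
        rw [hrowget ch _ (Nat.mod_lt _ (by omega))]
        beta_reduce
        rw [if_pos hch]
        unfold pvW
        rw [hx p hpN, hch]
    · rw [if_neg (by simp [hch])]
      exact ⟨hlen, fun i hi => by simp [hch]⟩
  have houter := pv_fold_add N (PySem.List.dedup ((List.range N).map hd)) _
      (fun ch i => ((List.range N).map (fun p =>
          if hd p = ch then pvW x y z p ((p + N - i) % N) else 0)).sum)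
      (fun rots ch _ h => hinner ch rots h) (List.replicate N (0 : Int)) (by simp)
  have h0 : pvRots a y z (N : ℤ)
      = (PySem.List.dedup ((List.range N).map hd)).foldl (fun rots ch =>
          (List.range N).foldl (fun rots (p : ℕ) =>
            if PySem.List.pyGetD ((List.range N).map hd) (p : ℤ) ' ' == ch then
              List.zipWith (· + ·) rots
                ((PySem.List.slice (pvRow y z (N : ℤ) ch ++ pvRow y z (N : ℤ) ch)
                    (some ((p : ℤ) + 1)) (some ((p : ℤ) + (N : ℤ) + 1))).reverse)
            else rots) rots) (List.replicate N (0 : Int)) := by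
    rw [pvRots, hH]
    simp only [PySem.List.pyRange_zero_natCast, List.foldl_map, Int.toNat_natCast]
  rw [h0]
  apply List.ext_getElem
  · rw [houter.1]; simp
  · intro i h1 h2
    have hiN : i < N := by simpa using h2
    rw [← List.getD_eq_getElem _ 0 h1, houter.2 i hiN]
    rw [List.getD_eq_getElem _ _ (by simpa using hiN), List.getElem_replicate, zero_add]
    rw [List.getElem_map, List.getElem_range]
    calc ((PySem.List.dedup ((List.range N).map hd)).map (fun ch =>
            ((List.range N).map (fun p =>
              if hd p = ch then pvW x y z p ((p + N - i) % N) else 0)).sum)).sum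
        = ∑ p ∈ Finset.range N, ((PySem.List.dedup ((List.range N).map hd)).map (fun ch =>
              if hd p = ch then pvW x y z p ((p + N - i) % N) else 0)).sum :=
          pv_swap _ N (fun ch p => if hd p = ch then pvW x y z p ((p + N - i) % N) else 0)
      _ = ∑ p ∈ Finset.range N, pvW x y z p ((p + N - i) % N) := by
          refine Finset.sum_congr rfl ?_
          intro p hp
          exact pv_sum_single _ (hd p) _ (PySem.List.nodup_dedup _)
            ((PySem.List.mem_dedup _ _).mpr
              (List.mem_map.mpr ⟨p, List.mem_range.mpr (Finset.mem_range.mp hp), rfl⟩))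
      _ = pvCurr x y z N i := pv_rot x y z N i hiN

theorem pv_B_eq (a bs cs : String) (N : ℕ) (hN : 0 < N)
    (ha : N ≤ a.toList.length) (hb : N ≤ bs.toList.length) (hc : N ≤ cs.toList.length) :
    similarStrings_alt (N : ℤ) a bs cs =
      [(pvAns (pvCurr (a.toList.map (fun i => (i.toNat : Int))) (bs.toList.map (fun i => (i.toNat : Int)))
          (cs.toList.map (fun i => (i.toNat : Int))) N) N).1,
       (pvAns (pvCurr (a.toList.map (fun i => (i.toNat : Int))) (bs.toList.map (fun i => (i.toNat : Int)))
          (cs.toList.map (fun i => (i.toNat : Int))) N) N).2] := by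
  have h0 : similarStrings_alt (N : ℤ) a bs cs =
      [((pvRots a (bs.toList.map (fun i => (i.toNat : Int))) (cs.toList.map (fun i => (i.toNat : Int))) (N : ℤ)).foldl
          (fun (ans : Int × Int) t => (max ans.1 t, min ans.2 t)) ((0 : Int), (2147483647 : Int))).1,
       ((pvRots a (bs.toList.map (fun i => (i.toNat : Int))) (cs.toList.map (fun i => (i.toNat : Int))) (N : ℤ)).foldl
          (fun (ans : Int × Int) t => (max ans.1 t, min ans.2 t)) ((0 : Int), (2147483647 : Int))).2] := rfl
  rw [h0, pv_rots_eq a bs cs N hN ha hb hc, List.foldl_map]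
  rfl

theorem pv_main (n : Int) (a b c : String)
    (h1 : n ≤ (a.toList.length : Int)) (h2 : n ≤ (b.toList.length : Int))
    (h3 : n ≤ (c.toList.length : Int)) :
    similarStrings n a b c = similarStrings_alt n a b c := by
  by_cases hpos : 0 < n
  · lift n to ℕ using (le_of_lt hpos) with N
    have hN : 0 < N := by exact_mod_cast hpos
    have ha : N ≤ a.toList.length := by exact_mod_cast h1
    have hb : N ≤ b.toList.length := by exact_mod_cast h2
    have hc : N ≤ c.toList.length := by exact_mod_cast h3
    rw [pv_A_eq a b c N, pv_B_eq a b c N hN ha hb hc]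
  · rw [Int.not_lt] at hpos
    have h0 : n.toNat = 0 := Int.toNat_of_nonpos hpos
    simp only [similarStrings, similarStrings_alt,
      PySem.List.pyRange_one_eq_nil hpos, h0, List.replicate_zero, List.foldl_nil,
      List.map_nil, PySem.List.dedup]
    rfl

-- ===== VERDICT (by name: the statement is the Claim_ definition above) =====
theorem similarStrings_spec : Claim_equal_similarStrings := by
  intro n a b c _hdom hpre
  exact pv_main n a b c hpre.1 hpre.2.1 hpre.2.2
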